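-- pv_equiv track=rewrite | github.com/t0r1n88/Lachesis | mental_state/spilberger_hanin_stai.py | calc_value_st
-- ===== SOURCE A (Python) =====
-- def calc_value_st(row):
--     """
--     Функция для подсчета значения
--     :return: число
--     """
--
--     lst_pr = [3,4,6,7,9,12,13,14,17,18,
--               1,2,5,8,10,11,15,16,19,20]
--     value_forward = 0  # результат
--     value_back = 0
--     for idx, value in enumerate(row,1):
--         if idx in lst_pr:
--             if idx in (3,4,6,7,9,12,13,14,17,18):
--                 value_forward += value
--             elif idx in (1,2,5,8,10,11,15,16,19,20):
--                 value_back += value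
--
--     return value_forward- value_back + 50
-- ===== SOURCE B (Python) =====
-- FWD = (3, 4, 6, 7, 9, 12, 13, 14, 17, 18)
-- BACK = (1, 2, 5, 8, 10, 11, 15, 16, 19, 20)
--
-- def calc_value_st(row):
--     n = len(row)
--     forward = sum(row[i - 1] for i in FWD if i <= n)
--     back = sum(row[i - 1] for i in BACK if i <= n)
--     return forward - back + 50
-- ===== Notes on version B (the rewrite author's own statement) =====
-- stated objective: faster
-- what changed: Instead of scanning the whole row with enumerate and membership tests, B directly indexes the row at the 20 fixed forward/backward positions (two gathers over the position tuples), so the work is constant in the row length.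
import Mathlib
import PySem

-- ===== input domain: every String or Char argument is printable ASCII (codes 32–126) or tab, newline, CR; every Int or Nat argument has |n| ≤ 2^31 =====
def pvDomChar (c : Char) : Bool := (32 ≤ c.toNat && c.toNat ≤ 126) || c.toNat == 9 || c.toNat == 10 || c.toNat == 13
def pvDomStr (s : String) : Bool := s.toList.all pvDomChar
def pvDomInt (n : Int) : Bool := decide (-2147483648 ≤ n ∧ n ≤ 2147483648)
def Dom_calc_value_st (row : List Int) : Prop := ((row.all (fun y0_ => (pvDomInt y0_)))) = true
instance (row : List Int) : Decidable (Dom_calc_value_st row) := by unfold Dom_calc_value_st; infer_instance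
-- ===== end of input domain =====

-- Header: B replaces A's scan over the whole row (enumerate + membership branching)
-- by two direct-indexing gathers over the fixed forward/backward position tuples,
-- doing constant work in the row length (objective: faster).

-- ===== PORT A =====
def pvLstPr : List Int := [3,4,6,7,9,12,13,14,17,18,1,2,5,8,10,11,15,16,19,20]
def pvFwd : List Int := [3,4,6,7,9,12,13,14,17,18]
def pvBack : List Int := [1,2,5,8,10,11,15,16,19,20]

-- the enumerate-loop of A: state (value_forward, value_back), idx starts at 1
def pvLoopA : List Int → Int → Int × Int → Int × Int
  | [], _, st => st
  | v :: rest, idx, (vf, vb) =>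
    if idx ∈ pvLstPr then
      if idx ∈ pvFwd then pvLoopA rest (idx + 1) (vf + v, vb)
      else if idx ∈ pvBack then pvLoopA rest (idx + 1) (vf, vb + v)
      else pvLoopA rest (idx + 1) (vf, vb)
    else pvLoopA rest (idx + 1) (vf, vb)

def calc_value_st (row : List Int) : Int :=
  let st := pvLoopA row 1 (0, 0)
  st.1 - st.2 + 50

-- ===== PORT B =====
-- B's generator-sum 'sum(row[i-1] for i in idxs if i <= n)': a fold over the index tuple,
-- reading the row by direct indexing (PySem.List.pyGetD; the guard i ≤ n keeps it in range)
def pvIdxSum (row : List Int) (idxs : List Int) : Int :=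
  idxs.foldl (fun acc i => if i ≤ (row.length : Int) then acc + PySem.List.pyGetD row (i - 1) 0 else acc) 0

def calc_value_st_alt (row : List Int) : Int :=
  pvIdxSum row pvFwd - pvIdxSum row pvBack + 50

-- ===== PRECONDITION & SPEC =====
def Spec_calc_value_st (row : List Int) (out : Int) : Prop := out = calc_value_st_alt row
instance (row : List Int) (out : Int) : Decidable (Spec_calc_value_st row out) := by unfold Spec_calc_value_st; infer_instance

-- ===== CLAIM (what is proved, stated in full; the proofs are below) =====
def Claim_equal_calc_value_st : Prop := ∀ (row : List Int), Dom_calc_value_st row → Spec_calc_value_st row (calc_value_st row)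

-- ===== LEMMAS AND PROOFS =====
-- proof-side reference loop: a single weighted pass (only used by the proofs below)
def pvWeights : List Int := [-1,-1,1,1,-1,1,1,-1,1,-1,-1,1,1,1,-1,-1,1,1,-1,-1]

def pvLoopR : List Int → Int → Int → Int
  | [], _, acc => acc
  | v :: rest, idx, acc =>
    if idx ≤ 20 then pvLoopR rest (idx + 1) (acc + pvWeights.getD (idx - 1).toNat 0 * v)
    else pvLoopR rest (idx + 1) acc

theorem pvLoopR_shift (row : List Int) : ∀ (idx acc : Int),
    pvLoopR row idx acc = acc + pvLoopR row idx 0 := by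
  induction row with
  | nil => intro idx acc; simp [pvLoopR]
  | cons v rest ih =>
    intro idx acc
    simp only [pvLoopR]
    split
    · rw [ih (idx + 1) (acc + _), ih (idx + 1) (0 + _)]; ring
    · exact ih (idx + 1) acc

-- the 20 positions, decided once: membership pattern and the matching weight
theorem pvKey : ∀ n : Nat, n < 20 →
    ((n : Int) + 1 ∈ pvLstPr ∧
      (((n : Int) + 1 ∈ pvFwd ∧ pvWeights.getD n 0 = 1) ∨
       ((n : Int) + 1 ∉ pvFwd ∧ (n : Int) + 1 ∈ pvBack ∧ pvWeights.getD n 0 = -1))) := by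
  decide

-- invariant: along A's loop, (vf - vb) advances exactly by the weighted pass
theorem pvLoop_inv (row : List Int) : ∀ (idx vf vb : Int), 1 ≤ idx →
    (pvLoopA row idx (vf, vb)).1 - (pvLoopA row idx (vf, vb)).2 =
      vf - vb + pvLoopR row idx 0 := by
  induction row with
  | nil => intro idx vf vb h; simp [pvLoopA, pvLoopR]
  | cons v rest ih =>
    intro idx vf vb h
    by_cases h20 : idx ≤ 20
    · obtain ⟨hin, hcase⟩ := pvKey (idx - 1).toNat (by omega)
      have hidx : (((idx - 1).toNat : Nat) : Int) + 1 = idx := by omega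
      rw [hidx] at hin hcase
      simp only [pvLoopA, pvLoopR, if_pos hin, if_pos h20]
      rcases hcase with ⟨hf, hw⟩ | ⟨hnf, hb, hw⟩
      · rw [if_pos hf, ih _ _ _ (by omega),
            pvLoopR_shift rest (idx + 1) (0 + pvWeights.getD (idx - 1).toNat 0 * v), hw]
        ring
      · rw [if_neg hnf, if_pos hb, ih _ _ _ (by omega),
            pvLoopR_shift rest (idx + 1) (0 + pvWeights.getD (idx - 1).toNat 0 * v), hw]
        ring
    · have hA : idx ∉ pvLstPr := by
        simp only [pvLstPr, List.mem_cons, List.not_mem_nil, or_false]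
        omega
      simp only [pvLoopA, pvLoopR, if_neg hA, if_neg h20]
      exact ih _ _ _ (by omega)

-- one generator term of B: for a positive index it is a plain List.getD read
theorem pvTerm (row : List Int) (i acc : Int) (h1 : 1 ≤ i) :
    (if i ≤ (row.length : Int) then acc + PySem.List.pyGetD row (i - 1) 0 else acc)
      = acc + row.getD (i - 1).toNat 0 := by
  have hc : i - 1 = (((i - 1).toNat : Nat) : Int) := by omega
  by_cases h : i ≤ (row.length : Int)
  · rw [if_pos h, hc, PySem.List.pyGetD_natCast]
    rw [Int.toNat_natCast]
  · rw [if_neg h]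
    have hd : row.getD (i - 1).toNat 0 = 0 := by
      unfold List.getD
      rw [List.getElem?_eq_none (by omega)]
      rfl
    rw [hd]
    ring

-- so B's gather over an index list of positive indices is a fold of getD reads
theorem pvIdxSum_eq (row : List Int) : ∀ (idxs : List Int), (∀ i ∈ idxs, 1 ≤ i) → ∀ (acc : Int),
    idxs.foldl (fun acc i => if i ≤ (row.length : Int) then acc + PySem.List.pyGetD row (i - 1) 0 else acc) acc
      = idxs.foldl (fun acc i => acc + row.getD (i - 1).toNat 0) acc := by
  intro idxs
  induction idxs with
  | nil => intro _ acc; rfl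
  | cons i rest ih =>
    intro h acc
    simp only [List.foldl]
    rw [pvTerm row i acc (h i List.mem_cons_self)]
    exact ih (fun j hj => h j (List.mem_cons_of_mem _ hj)) _

-- the weighted pass is the weighted sum of the first 20 cells (getD, default 0)
theorem pvLoopR_sum (row : List Int) : ∀ (j : Nat),
    pvLoopR row ((j : Int) + 1) 0 = ∑ k ∈ Finset.Ico j 20, pvWeights.getD k 0 * row.getD (k - j) 0 := by
  induction row with
  | nil =>
    intro j
    simp [pvLoopR]
  | cons v rest ih =>
    intro j
    simp only [pvLoopR]
    split
    · rename_i hle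
      have hj : j < 20 := by omega
      have hidx : ((j : Int) + 1 - 1).toNat = j := by omega
      have hcast : (j : Int) + 1 + 1 = ((j + 1 : Nat) : Int) + 1 := by push_cast; ring
      rw [hidx, hcast, pvLoopR_shift, ih (j + 1),
        Finset.sum_eq_sum_Ico_succ_bot (by omega : j < 20)]
      have hsum : ∑ k ∈ Finset.Ico (j+1) 20, pvWeights.getD k 0 * (v :: rest).getD (k - j) 0
          = ∑ k ∈ Finset.Ico (j+1) 20, pvWeights.getD k 0 * rest.getD (k - (j+1)) 0 := by
        apply Finset.sum_congr rfl
        intro k hk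
        have hk' := Finset.mem_Ico.mp hk
        have : k - j = (k - (j + 1)) + 1 := by omega
        rw [this, List.getD_cons_succ]
      rw [hsum]
      simp only [Nat.sub_self, List.getD_cons_zero]
      ring
    · rename_i hgt
      have hj : ¬ j < 20 := by omega
      have hcast : (j : Int) + 1 + 1 = ((j + 1 : Nat) : Int) + 1 := by push_cast; ring
      rw [hcast, ih (j + 1), Finset.Ico_eq_empty (by omega), Finset.Ico_eq_empty (by omega)]
      simp

-- bridge: the weighted pass equals B's two gathers
theorem pvBridge (row : List Int) :
    pvLoopR row 1 0 = pvIdxSum row pvFwd - pvIdxSum row pvBack := by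
  have h0 : pvLoopR row 1 0 = pvLoopR row ((0 : Nat) + 1) 0 := by norm_num
  rw [h0, pvLoopR_sum row 0]
  unfold pvIdxSum
  rw [pvIdxSum_eq row pvFwd (by decide), pvIdxSum_eq row pvBack (by decide)]
  have hIco : Finset.Ico 0 20 = Finset.range 20 := by rfl
  rw [hIco]
  simp only [Finset.sum_range_succ, Finset.range_zero, Finset.sum_empty,
    pvFwd, pvBack, pvWeights, List.foldl, Nat.sub_zero]
  norm_num
  simp only [show Int.toNat 2 = 2 from rfl, show Int.toNat 3 = 3 from rfl, show Int.toNat 4 = 4 from rfl, show Int.toNat 5 = 5 from rfl, show Int.toNat 6 = 6 from rfl, show Int.toNat 7 = 7 from rfl, show Int.toNat 8 = 8 from rfl, show Int.toNat 9 = 9 from rfl, show Int.toNat 10 = 10 from rfl, show Int.toNat 11 = 11 from rfl, show Int.toNat 12 = 12 from rfl, show Int.toNat 13 = 13 from rfl, show Int.toNat 14 = 14 from rfl, show Int.toNat 15 = 15 from rfl, show Int.toNat 16 = 16 from rfl, show Int.toNat 17 = 17 from rfl, show Int.toNat 18 = 18 from rfl, show Int.toNat 19 = 19 from rfl]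
  ring

-- ===== VERDICT (by name: the statement is the Claim_ definition above) =====
theorem calc_value_st_spec : Claim_equal_calc_value_st := by
  intro row _
  unfold Spec_calc_value_st calc_value_st calc_value_st_alt
  have h := pvLoop_inv row 1 0 0 (by norm_num)
  rw [pvBridge] at h
  simp only at h ⊢
  omega
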